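-- pv_equiv track=rewrite | github.com/oukenshild/weather-bot | main.py | cities_keyboard
-- ===== SOURCE A (Python) =====
-- def cities_keyboard(cities: list[tuple[int, str]]) -> dict:
--     # Telegram Bot API inline keyboard format
--     rows: list[list[dict]] = []
--     row: list[dict] = []
--     for city_id, city in cities:
--         row.append({"text": city, "callback_data": f"city_id:{city_id}"})
--         if len(row) == 2:
--             rows.append(row)
--             row = []
--     if row:
--         rows.append(row)
--     rows.append([{"text": "Мой город", "callback_data": "add_city"}])
--     return {"inline_keyboard": rows}
-- ===== SOURCE B (Python) =====
-- def cities_keyboard(cities: list[tuple[int, str]]) -> dict: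
--     rows = [
--         [{"text": city, "callback_data": f"city_id:{city_id}"}
--          for city_id, city in cities[i:i + 2]]
--         for i in range(0, len(cities), 2)
--     ]
--     rows.append([{"text": "Мой город", "callback_data": "add_city"}])
--     return {"inline_keyboard": rows}
-- ===== Notes on version B (the rewrite author's own statement) =====
-- stated objective: simpler
-- what changed: Replaces the running row-buffer with flush-on-2 and trailing remainder check by stride-2 slicing: one comprehension over chunk starts builds each row directly.
import Mathlib
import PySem

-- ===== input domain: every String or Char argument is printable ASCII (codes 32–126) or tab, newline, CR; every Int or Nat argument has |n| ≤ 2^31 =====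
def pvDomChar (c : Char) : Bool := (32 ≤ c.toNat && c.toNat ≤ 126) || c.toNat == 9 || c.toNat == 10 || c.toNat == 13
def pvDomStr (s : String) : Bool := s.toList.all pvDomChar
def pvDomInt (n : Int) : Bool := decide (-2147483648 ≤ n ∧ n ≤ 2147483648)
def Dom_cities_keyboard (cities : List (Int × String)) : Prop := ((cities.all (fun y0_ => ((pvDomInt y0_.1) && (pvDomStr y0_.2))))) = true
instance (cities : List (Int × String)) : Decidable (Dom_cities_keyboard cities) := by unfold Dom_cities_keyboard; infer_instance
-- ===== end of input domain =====

-- B replaces A's running row-buffer (flush on length 2, trailing remainder check) by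
-- stride-2 slicing over chunk-start indices; objective: simpler. Return value only.

-- ===== PORT A =====
-- the button dict literal both Pythons build: {"text": city, "callback_data": f"city_id:{city_id}"}
def pvBtn (city_id : Int) (city : String) : List (String × String) :=
  [("text", city), ("callback_data", "city_id:" ++ PySem.Int.toStr city_id)]

-- loop body of A: append the button to the running row, flush when it reaches length 2
def pvStepA (st : List (List (List (String × String))) × List (List (String × String)))
    (c : Int × String) : List (List (List (String × String))) × List (List (String × String)) :=
  let row := st.2 ++ [pvBtn c.1 c.2]
  if row.length == 2 then (st.1 ++ [row], []) else (st.1, row)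

def cities_keyboard (cities : List (Int × String)) : List (String × List (List (List (String × String)))) :=
  let st := cities.foldl pvStepA ([], [])
  let rows := if st.2 ≠ [] then st.1 ++ [st.2] else st.1   -- 'if row: rows.append(row)'
  [("inline_keyboard", rows ++ [[[("text", "Мой город"), ("callback_data", "add_city")]]])]

-- ===== PORT B =====
def cities_keyboard_alt (cities : List (Int × String)) : List (String × List (List (List (String × String)))) :=
  -- rows = [[btn(c) for c in cities[i:i+2]] for i in range(0, len(cities), 2)]
  let rows := (PySem.List.pyRange 0 (cities.length : Int) 2).map
    (fun i => (PySem.List.slice cities (some i) (some (i + 2))).map (fun c => pvBtn c.1 c.2))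
  [("inline_keyboard", rows ++ [[[("text", "Мой город"), ("callback_data", "add_city")]]])]

-- ===== PRECONDITION & SPEC =====
def Spec_cities_keyboard (cities : List (Int × String)) (out : List (String × List (List (List (String × String))))) : Prop := out = cities_keyboard_alt cities
instance (cities : List (Int × String)) (out : List (String × List (List (List (String × String))))) : Decidable (Spec_cities_keyboard cities out) := by unfold Spec_cities_keyboard; infer_instance

-- ===== CLAIM (what is proved, stated in full; the proofs are below) =====
def Claim_equal_cities_keyboard : Prop := ∀ (cities : List (Int × String)), Dom_cities_keyboard cities → Spec_cities_keyboard cities (cities_keyboard cities)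

-- ===== LEMMAS AND PROOFS =====

-- the common value: cities chopped into rows of two buttons
def pvChunks : List (Int × String) → List (List (List (String × String)))
  | [] => []
  | [c] => [[pvBtn c.1 c.2]]
  | a :: b :: rest => [pvBtn a.1 a.2, pvBtn b.1 b.2] :: pvChunks rest

-- A-side: the fold with running row, finished by the trailing 'if row' flush, yields pvChunks
theorem pvLoopA : ∀ (cs : List (Int × String)) (rows : List (List (List (String × String)))),
    (let st := cs.foldl pvStepA (rows, []);
     if st.2 ≠ [] then st.1 ++ [st.2] else st.1) = rows ++ pvChunks cs
  | [], rows => by simp [pvChunks]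
  | [c], rows => by simp [pvStepA, pvChunks]
  | a :: b :: rest, rows => by
    have ih := pvLoopA rest (rows ++ [[pvBtn a.1 a.2, pvBtn b.1 b.2]])
    simp only [List.foldl, pvStepA, List.nil_append, List.length, pvChunks] at *
    simpa using ih

-- range(0, n+2, 2) = 0 :: (i+2 for i in range(0, n, 2))
theorem pvRange2_cons (n : ℕ) :
    PySem.List.pyRange 0 ((n : Int) + 2) 2 =
      0 :: (PySem.List.pyRange 0 (n : Int) 2).map (· + 2) := by
  rw [PySem.List.pyRange_of_pos _ _ (by norm_num), PySem.List.pyRange_of_pos _ _ (by norm_num)]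
  have h2 : (0 : Int) < (n : Int) + 2 := by positivity
  rw [if_pos h2]
  by_cases hn : (0 : Int) < (n : Int)
  · rw [if_pos hn]
    have : (((n : Int) + 2 - 0 + 2 - 1) / 2).toNat = (((n : Int) - 0 + 2 - 1) / 2).toNat + 1 := by
      omega
    rw [this, List.range_succ_eq_map]
    simp only [List.map_cons, List.map_map]
    refine congrArg₂ List.cons (by norm_num) (List.map_congr_left ?_)
    intro k _
    simp only [Function.comp_apply, Nat.succ_eq_add_one]
    push_cast
    ring
  · rw [if_neg hn]
    have hn0 : n = 0 := by omega
    subst hn0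
    decide

-- cities[i+2:i+4] of a::b::rest equals rest[i:i+2], for 0 ≤ i
theorem pvSliceShift2 (a b : Int × String) (rest : List (Int × String)) (i : Int) (h : 0 ≤ i) :
    PySem.List.slice (a :: b :: rest) (some (i + 2)) (some (i + 2 + 2)) =
      PySem.List.slice rest (some i) (some (i + 2)) := by
  rw [PySem.List.slice_toNat _ (by omega) (by omega), PySem.List.slice_toNat _ h (by omega)]
  have h1 : (i + 2).toNat = i.toNat + 2 := by omega
  have h2 : (i + 2 + 2).toNat = i.toNat + 4 := by omega
  rw [h1, h2]
  simp only [List.drop_succ_cons]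
  congr 1
  omega

-- B-side: the slice comprehension yields pvChunks
theorem pvLoopB : ∀ (cs : List (Int × String)),
    (PySem.List.pyRange 0 (cs.length : Int) 2).map
      (fun i => (PySem.List.slice cs (some i) (some (i + 2))).map (fun c => pvBtn c.1 c.2)) =
      pvChunks cs
  | [] => by decide
  | [c] => by
    have h : PySem.List.pyRange 0 ((([c] : List (Int × String)).length : Int)) 2 = [0] := by
      simp only [List.length_cons, List.length_nil]; decide
    rw [h]
    simp [PySem.List.slice_to, pvChunks]
  | a :: b :: rest => by
    have hlen : (((a :: b :: rest : List (Int × String)).length : Int)) = (rest.length : Int) + 2 := by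
      simp; ring
    rw [hlen, pvRange2_cons rest.length]
    simp only [List.map_cons, List.map_map, pvChunks]
    have hhead : List.map (fun c => pvBtn c.1 c.2)
        (PySem.List.slice (a :: b :: rest) (some 0) (some (0 + 2))) =
        [pvBtn a.1 a.2, pvBtn b.1 b.2] := by
      rw [PySem.List.slice_toNat _ (by norm_num) (by norm_num)]
      simp
    rw [hhead]
    congr 1
    rw [show ((fun i => (PySem.List.slice (a :: b :: rest) (some i) (some (i + 2))).map
            (fun c => pvBtn c.1 c.2)) ∘ (· + 2)) =
          (fun i => (PySem.List.slice (a :: b :: rest) (some (i + 2)) (some (i + 2 + 2))).map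
            (fun c => pvBtn c.1 c.2)) from rfl]
    have htail : List.map (fun i => (PySem.List.slice (a :: b :: rest) (some (i + 2))
            (some (i + 2 + 2))).map (fun c => pvBtn c.1 c.2))
          (PySem.List.pyRange 0 (rest.length : Int) 2) =
        List.map (fun i => (PySem.List.slice rest (some i) (some (i + 2))).map
            (fun c => pvBtn c.1 c.2))
          (PySem.List.pyRange 0 (rest.length : Int) 2) := by
      refine List.map_congr_left ?_
      intro i hi
      have h0 : 0 ≤ i := by
        have := (PySem.List.mem_pyRange_iff_of_pos (by norm_num : (0:Int) < 2) i).mp hi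
        omega
      rw [pvSliceShift2 a b rest i h0]
    rw [htail]
    exact pvLoopB rest

-- ===== VERDICT (by name: the statement is the Claim_ definition above) =====
theorem cities_keyboard_spec : Claim_equal_cities_keyboard := by
  intro cities _
  have h := pvLoopA cities []
  simp only [List.nil_append] at h
  unfold Spec_cities_keyboard
  simp only [cities_keyboard, cities_keyboard_alt, pvLoopB cities, h]
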